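-- pv_equiv track=rewrite | github.com/scirelli/adventofcode.com | 2016/day/14/solution_part1.py | firstThreeInARow
-- ===== SOURCE A (Python) =====
-- def firstThreeInARow(hash):
-- 	str = hash.lower()
-- 	i = 0
-- 	l = len(str) - 2
--
-- 	while i < l:
-- 		c1 = str[i:i+1]
-- 		c2 = str[i+1:i+2]
-- 		c3 = str[i+2:i+3]
-- 		if(c1 == c2 and c2 == c3):
-- 			return c1
-- 		i += 1
--
-- 	return None
-- ===== SOURCE B (Python) =====
-- from itertools import groupby
--
-- def firstThreeInARow(hash):
--     for c, g in groupby(hash.lower()):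
--         if sum(1 for _ in g) >= 3:
--             return c
--     return None
-- ===== Notes on version B (the rewrite author's own statement) =====
-- stated objective: idiomatic
-- what changed: Replaced the index-stepping window-of-three comparison with an itertools.groupby traversal over maximal runs of equal characters, returning the character of the first run of length >= 3.
import Mathlib
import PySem

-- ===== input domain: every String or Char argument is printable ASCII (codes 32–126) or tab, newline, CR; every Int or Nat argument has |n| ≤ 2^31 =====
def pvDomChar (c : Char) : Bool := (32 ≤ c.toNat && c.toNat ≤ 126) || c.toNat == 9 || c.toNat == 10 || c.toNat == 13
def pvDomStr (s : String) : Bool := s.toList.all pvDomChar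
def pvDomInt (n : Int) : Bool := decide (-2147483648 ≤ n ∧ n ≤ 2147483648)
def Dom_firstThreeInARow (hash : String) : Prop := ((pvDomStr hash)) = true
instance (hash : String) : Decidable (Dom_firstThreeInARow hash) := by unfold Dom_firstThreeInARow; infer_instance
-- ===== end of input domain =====

-- Header: B replaces A's index-stepping window-of-three scan with a groupby-style
-- traversal over maximal runs of equal characters (objective: more idiomatic).

-- ===== PORT A =====
-- while i < len(str)-2: compare str[i], str[i+1], str[i+2]; structural recursion on the char list.
def pvAScan : List Char → Option String
  | c1 :: c2 :: c3 :: rest =>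
    if c1 = c2 ∧ c2 = c3 then some (String.mk [c1]) else pvAScan (c2 :: c3 :: rest)
  | _ => none

def firstThreeInARow (hash : String) : Option String :=
  pvAScan (PySem.Str.lower hash).toList

-- ===== PORT B =====
-- itertools.groupby: maximal runs of equal consecutive chars as (char, run length).
def pvRuns : List Char → List (Char × Nat)
  | [] => []
  | c :: rest =>
    match pvRuns rest with
    | (d, n) :: t => if c = d then (c, n + 1) :: t else (c, 1) :: (d, n) :: t
    | [] => [(c, 1)]

def firstThreeInARow_alt (hash : String) : Option String :=
  ((pvRuns (PySem.Str.lower hash).toList).find? (fun p => 3 ≤ p.2)).map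
    (fun p => String.mk [p.1])

-- ===== PRECONDITION & SPEC =====
def Spec_firstThreeInARow (hash : String) (out : Option String) : Prop := out = firstThreeInARow_alt hash
instance (hash : String) (out : Option String) : Decidable (Spec_firstThreeInARow hash out) := by unfold Spec_firstThreeInARow; infer_instance

-- ===== CLAIM (what is proved, stated in full; the proofs are below) =====
def Claim_equal_firstThreeInARow : Prop := ∀ (hash : String), Dom_firstThreeInARow hash → Spec_firstThreeInARow hash (firstThreeInARow hash)

-- ===== LEMMAS AND PROOFS =====

def pvFirstBig (rs : List (Char × Nat)) : Option String :=
  (rs.find? (fun p => 3 ≤ p.2)).map (fun p => String.mk [p.1])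

theorem pvRuns_cons (c : Char) (xs : List Char) :
    pvRuns (c :: xs) =
      match pvRuns xs with
      | (d, n) :: t => if c = d then (c, n + 1) :: t else (c, 1) :: (d, n) :: t
      | [] => [(c, 1)] := rfl

theorem pvRuns_head (x : Char) (xs : List Char) :
    ∃ n t, pvRuns (x :: xs) = (x, n + 1) :: t := by
  cases h : pvRuns xs with
  | nil => exact ⟨0, [], by rw [pvRuns_cons, h]⟩
  | cons p t =>
    obtain ⟨d, n⟩ := p
    by_cases hx : x = d
    · exact ⟨n, t, by rw [pvRuns_cons, h]; simp [hx]⟩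
    · exact ⟨0, (d, n) :: t, by rw [pvRuns_cons, h]; simp [hx]⟩

theorem pvScan_eq (l : List Char) : pvAScan l = pvFirstBig (pvRuns l) := by
  induction l with
  | nil => simp [pvAScan, pvRuns, pvFirstBig]
  | cons c1 tl ih =>
    match tl, ih with
    | [], _ => simp [pvAScan, pvRuns, pvFirstBig, List.find?]
    | [c2], _ =>
      by_cases h : c1 = c2 <;>
        simp [pvAScan, pvRuns, pvFirstBig, List.find?, h]
    | c2 :: c3 :: rest, ih =>
      by_cases h12 : c1 = c2
      · obtain ⟨n, t, ht⟩ := pvRuns_head c3 rest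
        by_cases h23 : c2 = c3
        · subst h23; subst h12
          have h1 : pvRuns (c1 :: c1 :: c1 :: rest) = (c1, n + 3) :: t := by
            rw [pvRuns_cons, pvRuns_cons, ht]; simp
          simp [pvAScan, pvFirstBig, h1, List.find?]
        · subst h12
          have h2 : pvRuns (c1 :: c3 :: rest) = (c1, 1) :: (c3, n + 1) :: t := by
            rw [pvRuns_cons, ht]; simp [h23]
          have h1 : pvRuns (c1 :: c1 :: c3 :: rest) = (c1, 2) :: (c3, n + 1) :: t := by
            rw [pvRuns_cons, h2]; simp
          have hA : pvAScan (c1 :: c1 :: c3 :: rest) = pvAScan (c1 :: c3 :: rest) := by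
            simp [pvAScan, h23]
          rw [hA, ih, pvFirstBig, pvFirstBig, h1, h2]
          simp [List.find?]
      · obtain ⟨n, t, ht⟩ := pvRuns_head c2 (c3 :: rest)
        have h1 : pvRuns (c1 :: c2 :: c3 :: rest) = (c1, 1) :: (c2, n + 1) :: t := by
          rw [pvRuns_cons, ht]; simp [h12]
        have hA : pvAScan (c1 :: c2 :: c3 :: rest) = pvAScan (c2 :: c3 :: rest) := by
          simp [pvAScan, h12]
        rw [hA, ih, pvFirstBig, pvFirstBig, h1, ht]
        simp [List.find?]

-- ===== VERDICT (by name: the statement is the Claim_ definition above) =====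
theorem firstThreeInARow_spec : Claim_equal_firstThreeInARow := by
  intro hash _
  show firstThreeInARow hash = firstThreeInARow_alt hash
  simp only [firstThreeInARow, firstThreeInARow_alt, pvScan_eq, pvFirstBig]
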